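-- pv_equiv track=rewrite | github.com/murkins/Homework | KateHaravaya/Task.4.9.py | get_characters_4
-- ===== SOURCE A (Python) =====
-- import string
--
-- def get_characters_4(number_of_strings):
--     characters = []
--
--     string_sets = [set(x.lower()) for x in number_of_strings]
--
--     for c in string.ascii_lowercase:
--         c_not_exist_in_all = True
--         for cur_set in string_sets:
--             if c in cur_set:
--                 c_not_exist_in_all = False
--                 break
--
--         if c_not_exist_in_all:
--             characters.append(c)
--
--     return characters
-- ===== SOURCE B (Python) =====
-- import string
--
-- def get_characters_4(number_of_strings):
--     seen = set()
--     for s in number_of_strings: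
--         seen.update(s.lower())
--     return [c for c in string.ascii_lowercase if c not in seen]
-- ===== Notes on version B (the rewrite author's own statement) =====
-- stated objective: simpler
-- what changed: Replaces A's 26xN nested scan-with-break over per-string sets by one union set of all lowercased characters built in a single pass, then one filter pass over ascii_lowercase.
import Mathlib
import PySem

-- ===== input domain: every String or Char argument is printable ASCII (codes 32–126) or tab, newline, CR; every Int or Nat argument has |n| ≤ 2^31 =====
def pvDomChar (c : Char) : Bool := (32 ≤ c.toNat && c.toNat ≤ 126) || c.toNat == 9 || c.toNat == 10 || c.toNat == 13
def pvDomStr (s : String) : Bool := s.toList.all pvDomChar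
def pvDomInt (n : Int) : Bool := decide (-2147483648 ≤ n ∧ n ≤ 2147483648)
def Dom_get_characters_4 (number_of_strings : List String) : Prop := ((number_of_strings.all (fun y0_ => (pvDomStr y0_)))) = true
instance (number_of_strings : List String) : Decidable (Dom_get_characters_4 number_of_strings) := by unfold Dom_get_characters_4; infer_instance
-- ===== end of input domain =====

-- B replaces A's 26×N nested scan-with-break by one union set of all lowercased
-- characters built in a single pass, then one filter pass over ascii_lowercase (simpler).

-- ===== PORT A =====
-- literal port: per-string lowercased sets, then for each of the 26 letters an
-- inner scan with break (= List.any) deciding whether to append the letter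
def get_characters_4 (number_of_strings : List String) : List String :=
  let string_sets : List (PySem.Set Char) :=
    number_of_strings.map (fun x => PySem.Set.ofList (PySem.Str.lower x).toList)
  "abcdefghijklmnopqrstuvwxyz".toList.foldl
    (fun characters c =>
      if !(string_sets.any (fun cur_set => PySem.Set.contains cur_set c)) then
        characters ++ [String.mk [c]]
      else characters) []

-- ===== PORT B =====
def get_characters_4_alt (number_of_strings : List String) : List String :=
  let seen : PySem.Set Char :=
    number_of_strings.foldl
      (fun acc s => PySem.Set.update acc (PySem.Str.lower s).toList) PySem.Set.empty
  ("abcdefghijklmnopqrstuvwxyz".toList.filter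
    (fun c => !(PySem.Set.contains seen c))).map (fun c => String.mk [c])

-- ===== PRECONDITION & SPEC =====
def Spec_get_characters_4 (number_of_strings : List String) (out : List String) : Prop := out = get_characters_4_alt number_of_strings
instance (number_of_strings : List String) (out : List String) : Decidable (Spec_get_characters_4 number_of_strings out) := by unfold Spec_get_characters_4; infer_instance

-- ===== CLAIM =====
def Claim_equal_get_characters_4 : Prop := ∀ (number_of_strings : List String), Dom_get_characters_4 number_of_strings → Spec_get_characters_4 number_of_strings (get_characters_4 number_of_strings)

-- ===== LEMMAS AND PROOFS =====

theorem mem_union_foldl (ns : List String) (acc : PySem.Set Char) (c : Char) :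
    c ∈ ns.foldl (fun a s => PySem.Set.update a (PySem.Str.lower s).toList) acc ↔
      c ∈ acc ∨ ∃ s ∈ ns, c ∈ (PySem.Str.lower s).toList := by
  induction ns generalizing acc with
  | nil => simp
  | cons h t ih =>
      simp only [List.foldl_cons, ih, PySem.Set.mem_update, List.mem_cons]
      constructor
      · rintro (⟨hc | hc⟩ | ⟨s, hs, hc⟩)
        · exact Or.inl hc
        · exact Or.inr ⟨h, Or.inl rfl, hc⟩
        · exact Or.inr ⟨s, Or.inr hs, hc⟩
      · rintro (hc | ⟨s, hs | hs, hc⟩)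
        · exact Or.inl (Or.inl hc)
        · exact Or.inl (Or.inr (hs ▸ hc))
        · exact Or.inr ⟨s, hs, hc⟩

theorem test_eq (ns : List String) (c : Char) :
    ((ns.map (fun x => PySem.Set.ofList (PySem.Str.lower x).toList)).any
        (fun cur_set => PySem.Set.contains cur_set c))
      = PySem.Set.contains
          (ns.foldl (fun a s => PySem.Set.update a (PySem.Str.lower s).toList) PySem.Set.empty) c := by
  rw [Bool.eq_iff_iff]
  simp only [List.any_eq_true, List.mem_map, PySem.Set.contains_iff, mem_union_foldl]
  constructor
  · rintro ⟨t, ⟨s, hs, rfl⟩, hc⟩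
    exact Or.inr ⟨s, hs, ((PySem.Set.mem_ofList _ _).mp hc)⟩
  · rintro (hc | ⟨s, hs, hc⟩)
    · exact absurd hc (by simp [PySem.Set.empty])
    · exact ⟨_, ⟨s, hs, rfl⟩, ((PySem.Set.mem_ofList _ _).mpr hc)⟩

-- ===== VERDICT =====
theorem get_characters_4_spec : Claim_equal_get_characters_4 := by
  intro ns _
  unfold Spec_get_characters_4 get_characters_4 get_characters_4_alt
  rw [PySem.List.foldl_append_if]
  simp only [List.nil_append]
  congr 1
  apply List.filter_congr
  intro c _
  rw [test_eq]
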